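-- pv_equiv track=rewrite | github.com/dongseoki/Studying-algorithms | FromACMRepo/dongseoki/python/PythonApplication1/PythonApplication1/2020 써머코딩/거듭제곱수.py | solution
-- ===== SOURCE A (Python) =====
-- def solution(n):
--     answer = 0
--     value = n
--     b = format(value, 'b')
--     sum =0
--     for idx in range(0,len(b)):
--         if b[idx] == '1':
--             powerNum = 3 ** (idx+1)
--             sum +=powerNum
--     answer = sum
--     return answer
-- ===== SOURCE B (Python) =====
-- def solution(n):
--     result = 0
--     while n:
--         result = result * 3 + (n & 1)
--         n >>= 1
--     return 3 * result
-- ===== Notes on version B (the rewrite author's own statement) =====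
-- stated objective: simpler
-- what changed: Replaces binary-string formatting plus per-index exponentiation with a direct Horner-style bit loop (multiply the accumulator by three, add the low bit, shift n right) and one final multiplication by three.
-- outside the precondition, e.g. on solution(-5): A returns 90, B does not finish within the time limit
import Mathlib
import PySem

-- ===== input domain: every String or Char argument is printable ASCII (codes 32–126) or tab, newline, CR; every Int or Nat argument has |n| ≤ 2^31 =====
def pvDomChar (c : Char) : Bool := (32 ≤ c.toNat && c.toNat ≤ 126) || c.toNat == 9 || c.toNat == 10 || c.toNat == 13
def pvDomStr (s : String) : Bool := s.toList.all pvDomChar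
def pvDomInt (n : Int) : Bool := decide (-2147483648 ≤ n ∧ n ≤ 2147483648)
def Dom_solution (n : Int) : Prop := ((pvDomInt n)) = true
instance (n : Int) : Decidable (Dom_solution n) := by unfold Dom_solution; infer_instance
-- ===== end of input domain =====

-- B replaces binary-string formatting and per-index 3**(idx+1) powers with a Horner-style
-- bit loop; objective: simpler. Pre_ excludes negative n, where A returns a value derived from
-- the '-' character of format(n,'b') shifting every index, while B's `while n:` loop diverges.


-- ===== PORT A =====
-- binary digits of m, MSB first ([] for 0); format(value,'b') prefixes '-' for negatives
def pyBits (m : Nat) : List Char :=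
  if m = 0 then [] else pyBits (m / 2) ++ [if m % 2 = 1 then '1' else '0']

def pyFormatB (n : Int) : List Char :=
  if n < 0 then '-' :: pyBits (-n).toNat
  else if n = 0 then ['0']
  else pyBits n.toNat

-- the `for idx in range(0, len(b))` loop with its running `sum`
def aLoop (cs : List Char) (idx : Nat) (sum : Int) : Int :=
  match cs with
  | [] => sum
  | c :: rest => aLoop rest (idx + 1) (if c = '1' then sum + 3 ^ (idx + 1) else sum)

def solution (n : Int) : Int :=
  let value := n
  let b := pyFormatB value
  aLoop b 0 0

-- ===== PORT B =====
-- the `while n:` Horner loop of Source B (Python B diverges for n < 0; Pre_ excludes those inputs)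
def bLoop (m : Nat) (result : Int) : Int :=
  if m = 0 then result else bLoop (m / 2) (result * 3 + (m % 2 : Int))

def solution_alt (n : Int) : Int := 3 * bLoop n.toNat 0

-- ===== PRECONDITION & SPEC =====
-- Pre_ excludes negative n: there A still returns a value (the '-' character shifts every
-- index of format(n,'b')), but B's `while n:` loop never terminates on negative ints.
def Pre_solution (n : Int) : Prop := 0 ≤ n
instance (n : Int) : Decidable (Pre_solution n) := by unfold Pre_solution; infer_instance
def pvWitness_solution : Int := 5

def Spec_solution (n : Int) (out : Int) : Prop := out = solution_alt n
instance (n : Int) (out : Int) : Decidable (Spec_solution n out) := by unfold Spec_solution; infer_instance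

-- ===== CLAIM (what is proved, stated in full; the proofs are below) =====
def Claim_equal_solution : Prop := ∀ (n : Int), Dom_solution n → Pre_solution n → Spec_solution n (solution n)

-- ===== LEMMAS AND PROOFS =====

theorem pyBits_zero : pyBits 0 = [] := by rw [pyBits]; simp

theorem pyBits_ne (m : Nat) (h : m ≠ 0) :
    pyBits m = pyBits (m / 2) ++ [if m % 2 = 1 then '1' else '0'] := by
  rw [pyBits]; simp [h]

theorem bLoop_zero (r : Int) : bLoop 0 r = r := by rw [bLoop]; simp

theorem bLoop_ne (m : Nat) (r : Int) (h : m ≠ 0) :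
    bLoop m r = bLoop (m / 2) (r * 3 + (m % 2 : Int)) := by
  rw [bLoop]; simp [h]

theorem aLoop_acc (cs : List Char) : ∀ (k : Nat) (s : Int),
    aLoop cs k s = s + aLoop cs k 0 := by
  induction cs with
  | nil => intro k s; simp [aLoop]
  | cons c rest ih =>
      intro k s
      simp only [aLoop]
      rw [ih (k+1) (if c = '1' then s + 3 ^ (k + 1) else s),
          ih (k+1) (if c = '1' then (0:Int) + 3 ^ (k + 1) else 0)]
      split <;> ring

theorem aLoop_append (xs ys : List Char) : ∀ (k : Nat),
    aLoop (xs ++ ys) k 0 = aLoop xs k 0 + aLoop ys (k + xs.length) 0 := by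
  induction xs with
  | nil => intro k; simp [aLoop]
  | cons c rest ih =>
      intro k
      simp only [List.cons_append, aLoop, List.length_cons]
      rw [aLoop_acc (rest ++ ys), aLoop_acc rest, ih (k+1)]
      have : k + 1 + rest.length = k + (rest.length + 1) := by omega
      rw [this]
      ring

theorem bLoop_acc (m : Nat) : ∀ (r : Int),
    bLoop m r = r * 3 ^ (pyBits m).length + bLoop m 0 := by
  induction m using Nat.strong_induction_on with
  | _ m ih =>
    intro r
    by_cases h : m = 0
    · subst h; simp [bLoop_zero, pyBits_zero]
    · rw [bLoop_ne m r h, bLoop_ne m 0 h, pyBits_ne m h]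
      have hlt : m / 2 < m := Nat.div_lt_self (Nat.pos_of_ne_zero h) (by norm_num)
      rw [ih (m / 2) hlt (r * 3 + (m % 2 : Int)), ih (m / 2) hlt ((0:Int) * 3 + (m % 2 : Int))]
      simp [List.length_append, pow_succ]
      ring

theorem aLoop_bits (m : Nat) : ∀ (k : Nat),
    aLoop (pyBits m) k 0 = 3 ^ (k + 1) * bLoop m 0 := by
  induction m using Nat.strong_induction_on with
  | _ m ih =>
    intro k
    by_cases h : m = 0
    · subst h; simp [pyBits_zero, aLoop, bLoop_zero]
    · have hlt : m / 2 < m := Nat.div_lt_self (Nat.pos_of_ne_zero h) (by norm_num)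
      rw [pyBits_ne m h, aLoop_append, ih (m / 2) hlt k]
      rw [bLoop_ne m 0 h, bLoop_acc (m / 2) ((0 : Int) * 3 + (m : Int) % 2)]
      rcases Nat.mod_two_eq_zero_or_one m with h2 | h2
      · have hm : (m : Int) % 2 = 0 := by omega
        simp [aLoop, h2, hm, pow_succ]
      · have hm : (m : Int) % 2 = 1 := by omega
        simp [aLoop, h2, hm, pow_succ, pow_add]
        ring

-- ===== VERDICT (by name: the statement is the Claim_ definition above) =====
theorem solution_spec : Claim_equal_solution := by
  intro n _ hpre
  unfold Pre_solution at hpre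
  unfold Spec_solution solution solution_alt
  simp only []
  by_cases h0 : n = 0
  · subst h0
    simp [pyFormatB, aLoop, bLoop_zero]
  · have hneg : ¬ n < 0 := by omega
    rw [pyFormatB, if_neg hneg, if_neg h0, aLoop_bits n.toNat 0]
    norm_num
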